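-- pv_equiv track=rewrite | github.com/nbubis/textual-synopsis | src/textual_synopsis/to_excel.py | align_to_words
-- ===== SOURCE A (Python) =====
-- def align_to_words(texts):
--     if not texts:
--         return []
--
--     # Verify lengths
--     length = len(texts[0]["content"])
--     for t in texts:
--         if len(t["content"]) != length:
--             raise ValueError(
--                 f"Length mismatch: {t['name']} has {len(t['content'])} vs {length}"
--             )
--
--     # Matrix of words
--     rows = [[] for _ in texts]
--
--     # Current word buffer for each row
--     current_words = [[] for _ in texts]
--
--     gap_char = "@"  # Hardcoded based on lib/genalog_alignment.py
--
--     for i in range(length):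
--         chars = [t["content"][i] for t in texts]
--
--         # Check if this column triggers a word break
--         # Break if ANY text has a space
--         is_break = any(c == " " for c in chars)
--
--         if is_break:
--             # Commit current words
--             for row_idx in range(len(texts)):
--                 word = "".join(current_words[row_idx])
--                 # Filter out gaps? or keep them?
--                 # User wants "single word". Gaps are not words.
--                 # If word is "abc@@", it should be "abc".
--                 # If word is "@@@", it becomes "".
--                 clean_word = word.replace(gap_char, "")
--                 rows[row_idx].append(clean_word)
--                 current_words[row_idx] = []
--         else:
--             # Append characters
--             for row_idx, char in enumerate(chars):
--                 # We append everything, including gaps, and clean at commit time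
--                 # Or clean now? No, keep logic simple.
--                 if char != " ":  # Don't append the space itself?
--                     # genalog alignment might align ' ' with ' '.
--                     # If we break on space, we consume the space.
--                     # What if ' ' aligns with '@'?
--                     # Then '@' is effectively a space holder.
--                     # We should NOT append '@' if it aligns to space.
--                     # But here we are in "else" (non-break).
--                     # Wait, if is_break is True, we commit.
--                     # What happens to the character at `i`?
--                     # It is a space (or aligned gap). It should be consumed as delimiter.
--                     pass
--
--             # Oh wait.
--             # If `chars` has ' ' at row 0, and 'X' at row 1.
--             # This is a conflict! space shouldn't align with char usually.
--             # But if it does?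
--             # 'My cat'
--             # 'Mypcat'
--             # Aligned: 'My cat'
--             #          'Mypcat'
--             # At space: row 0 is ' ', row 1 is 'p'.
--             # If we break: row 0 commits "My", row 1 commits "My".
--             # Next word starts: row 0 starts "cat", row 1 starts "cat" (with 'p' lost?)
--             # NO. 'p' must belong to one of them.
--             # If ' ' aligns with 'p' (substitution), then 'p' is part of the word? Or start of next?
--             # Space usually treated as delimiter. 'p' becomes a delimiter? No.
--             #
--             # In our case, with Star Alignment and gaps:
--             # Space should align with Space or Gap.
--             # If Space aligns with Char, it's a Substitution. Genalog penalty for Space-Mismatch is high?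
--             # "SPACE_MISMATCH_PENALTY = 0.1" in addition to mismatch.
--             # So likely space aligns with space or gap.
--             #
--             # Assumption: Space aligns only with Space or Gap.
--             # If so, the column `i` is a delimiter column.
--             # We discard `chars[i]` (spaces and gaps).
--             pass
--
--             if not is_break:
--                 for row_idx, char in enumerate(chars):
--                     current_words[row_idx].append(char)
--
--     # Commit last word
--     for row_idx in range(len(texts)):
--         word = "".join(current_words[row_idx])
--         clean_word = word.replace(gap_char, "")
--         rows[row_idx].append(clean_word)
--
--     return rows
-- ===== SOURCE B (Python) =====
-- def align_to_words(texts):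
--     if not texts:
--         return []
--
--     # Verify lengths
--     length = len(texts[0]["content"])
--     for t in texts:
--         if len(t["content"]) != length:
--             raise ValueError(
--                 f"Length mismatch: {t['name']} has {len(t['content'])} vs {length}"
--             )
--
--     # Columns where ANY text has a space are word breaks (shared by all rows).
--     breaks = [i for i in range(length)
--               if any(t["content"][i] == " " for t in texts)]
--
--     # Each row is its content sliced between consecutive break columns,
--     # with gap characters removed.
--     rows = []
--     for t in texts:
--         content = t["content"]
--         words = []
--         start = 0
--         for p in breaks:
--             words.append(content[start:p].replace("@", ""))
--             start = p + 1
--         words.append(content[start:].replace("@", ""))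
--         rows.append(words)
--     return rows
-- ===== Notes on version B (the rewrite author's own statement) =====
-- stated objective: alternative
-- what changed: Instead of A's column-by-column sweep maintaining per-row character buffers that are committed at each break, B first computes the list of break columns (columns where any text has a space) in one pass and then builds each row independently by slicing its content between consecutive break positions.
import Mathlib
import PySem

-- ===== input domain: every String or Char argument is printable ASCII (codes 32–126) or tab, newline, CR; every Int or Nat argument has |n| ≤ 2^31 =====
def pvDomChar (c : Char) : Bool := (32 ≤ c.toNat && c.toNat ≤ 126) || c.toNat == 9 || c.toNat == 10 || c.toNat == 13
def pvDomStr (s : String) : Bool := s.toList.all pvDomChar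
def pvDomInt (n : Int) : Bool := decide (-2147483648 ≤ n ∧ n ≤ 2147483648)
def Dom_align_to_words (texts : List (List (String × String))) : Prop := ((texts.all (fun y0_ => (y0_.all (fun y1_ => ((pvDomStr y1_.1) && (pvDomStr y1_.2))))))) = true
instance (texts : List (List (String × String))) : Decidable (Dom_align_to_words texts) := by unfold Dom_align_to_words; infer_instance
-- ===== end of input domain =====

-- B replaces A's column sweep over per-row character buffers by a one-pass list of break
-- columns plus per-row slicing; return values are proved equal on Pre_ (every dict has a
-- "content" key and all contents have equal length — exactly where A returns normally).

-- t["content"]: first-match lookup in the association list (dict)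
def pvContent (t : List (String × String)) : String := (List.lookup "content" t).getD ""

-- word.replace("@", "") applied to a list of characters; both Pythons do this verbatim
def pvClean (w : List Char) : String := PySem.Str.replace (String.ofList w) "@" ""

-- ===== PORT A =====
-- one iteration of A's `for i in range(length)` loop over the state (rows, current_words)
def pvStepA (cs : List (List Char)) (st : List (List String) × List (List Char)) (i : Int) :
    List (List String) × List (List Char) :=
  let chars := cs.map (fun c => (PySem.List.pyGet? c i).getD ' ')
  if chars.any (fun ch => ch == ' ') then
    (List.zipWith (fun r w => r ++ [pvClean w]) st.1 st.2, cs.map (fun _ => ([] : List Char)))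
  else
    (st.1, List.zipWith (fun w ch => w ++ [ch]) st.2 chars)

def align_to_words (texts : List (List (String × String))) : List (List String) :=
  match texts with
  | [] => []
  | t0 :: _ =>
    let L := (pvContent t0).toList.length
    if texts.any (fun t => (pvContent t).toList.length != L) then []  -- ValueError path, outside Pre_
    else
      let cs := texts.map (fun t => (pvContent t).toList)
      let st := (PySem.List.pyRange 0 (L : Int) 1).foldl (pvStepA cs)
        (texts.map (fun _ => []), texts.map (fun _ => []))
      List.zipWith (fun r w => r ++ [pvClean w]) st.1 st.2

-- ===== PORT B =====
-- one iteration of B's `for p in breaks` loop over the state (start, words)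
def pvStepB (c : List Char) (st : Int × List String) (p : Int) : Int × List String :=
  (p + 1, st.2 ++ [pvClean (PySem.List.slice c (some st.1) (some p))])

def align_to_words_alt (texts : List (List (String × String))) : List (List String) :=
  match texts with
  | [] => []
  | t0 :: _ =>
    let L := (pvContent t0).toList.length
    if texts.any (fun t => (pvContent t).toList.length != L) then []  -- ValueError path, outside Pre_
    else
      let cs := texts.map (fun t => (pvContent t).toList)
      let breaks := (PySem.List.pyRange 0 (L : Int) 1).filter
        (fun i => cs.any (fun c => (PySem.List.pyGet? c i).getD ' ' == ' '))
      cs.map (fun c =>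
        let st := breaks.foldl (pvStepB c) (0, [])
        st.2 ++ [pvClean (PySem.List.slice c (some st.1) none)])

-- ===== PRECONDITION & SPEC =====
-- Pre_ excludes exactly the inputs where A raises: a dict without a "content" key (KeyError)
-- or contents of unequal lengths (ValueError).
def Pre_align_to_words (texts : List (List (String × String))) : Prop :=
  (texts.all fun t => (List.lookup "content" t).isSome
      && (pvContent t).toList.length == (pvContent (texts.headD [])).toList.length) = true
instance (texts : List (List (String × String))) : Decidable (Pre_align_to_words texts) := by
  unfold Pre_align_to_words; infer_instance

def pvWitness_align_to_words : (List (List (String × String))) :=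
  [[("name", "a"), ("content", "my c@t")], [("name", "b"), ("content", "my@cat")]]

def Spec_align_to_words (texts : List (List (String × String))) (out : List (List String)) : Prop := out = align_to_words_alt texts
instance (texts : List (List (String × String))) (out : List (List String)) : Decidable (Spec_align_to_words texts out) := by unfold Spec_align_to_words; infer_instance

-- ===== CLAIM (what is proved, stated in full; the proofs are below) =====
def Claim_equal_align_to_words : Prop := ∀ (texts : List (List (String × String))), Dom_align_to_words texts → Pre_align_to_words texts → Spec_align_to_words texts (align_to_words texts)

-- ===== LEMMAS AND PROOFS =====

-- column i is a break column (some content has a space there)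
def pvBrk (cs : List (List Char)) (i : Nat) : Bool := cs.any (fun c => c.getD i ' ' == ' ')

-- reference splitting of one row: walk the suffix d = c.drop s, breaking at break columns
def pvRowWords (cs : List (List Char)) (s : Nat) (cur : List Char) : List Char → List (List Char)
  | [] => [cur]
  | ch :: rest =>
    if pvBrk cs s then cur :: pvRowWords cs (s+1) [] rest
    else pvRowWords cs (s+1) (cur ++ [ch]) rest

-- A's loop step specialised to a single row
def pvStepRow (cs : List (List Char)) (c : List Char) (st : List String × List Char) (i : Nat) :
    List String × List Char :=
  if pvBrk cs i then (st.1 ++ [pvClean st.2], []) else (st.1, st.2 ++ [c.getD i ' '])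

-- final commit of one row (A) / of one row's tail slice (B)
def pvFin (st : List String × List Char) : List String := st.1 ++ [pvClean st.2]
def pvFinB (c : List Char) (st : Int × List String) : List String :=
  st.2 ++ [pvClean (PySem.List.slice c (some st.1) none)]

theorem pyRange_cast (L : Nat) :
    PySem.List.pyRange 0 (L:Int) 1 = (List.range L).map (fun (k : Nat) => (k:Int)) := by
  rw [PySem.List.pyRange_one]
  simp only [sub_zero, Int.toNat_natCast, zero_add]

theorem charAt_cast (c : List Char) (i : Nat) :
    (PySem.List.pyGet? c (i:Int)).getD ' ' = c.getD i ' ' := by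
  simp [List.getD_eq_getElem?_getD]

-- A's step on a state of map-form is a map of per-row steps
-- zipWith of two maps of the same list (used to push A's zipWiths inside one map)
theorem pv_zipWith_map_same {α β γ δ : Type} (f : β → γ → δ) (g : α → β) (h : α → γ) :
    ∀ l : List α, List.zipWith f (l.map g) (l.map h) = l.map (fun a => f (g a) (h a))
  | [] => rfl
  | x :: xs => by simp [pv_zipWith_map_same f g h xs]

theorem stepA_map (cs : List (List Char)) (F : List Char → List String)
    (G : List Char → List Char) (i : Nat) :
    pvStepA cs (cs.map F, cs.map G) (i:Int)
      = (cs.map (fun c => (pvStepRow cs c (F c, G c) i).1),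
         cs.map (fun c => (pvStepRow cs c (F c, G c) i).2)) := by
  unfold pvStepA pvStepRow
  simp only [List.any_map, charAt_cast]
  rw [show (cs.any ((fun ch => ch == ' ') ∘ fun c => c.getD i ' ')) = pvBrk cs i from rfl]
  by_cases h : pvBrk cs i
  · simp [h]
  · simp [h]

-- A's whole loop on a state of map-form is a map of per-row loops
theorem foldA_map (cs : List (List Char)) (I : List Nat) :
    ∀ (F : List Char → List String) (G : List Char → List Char),
    I.foldl (fun st (i : Nat) => pvStepA cs st (i:Int)) (cs.map F, cs.map G)
      = (cs.map (fun c => (I.foldl (pvStepRow cs c) (F c, G c)).1),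
         cs.map (fun c => (I.foldl (pvStepRow cs c) (F c, G c)).2)) := by
  induction I with
  | nil => intro F G; rfl
  | cons i I ih =>
    intro F G
    rw [List.foldl_cons, stepA_map cs F G i,
        ih (fun c => (pvStepRow cs c (F c, G c) i).1)
           (fun c => (pvStepRow cs c (F c, G c) i).2)]
    simp only [List.foldl_cons]

-- per-row characterisation of A's loop + final commit
theorem rowA (cs : List (List Char)) (cl : List Char) :
    ∀ (d : List Char) (s : Nat) (row : List String) (cur : List Char), cl.drop s = d →
    pvFin ((List.range' s d.length).foldl (pvStepRow cs cl) (row, cur))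
      = row ++ (pvRowWords cs s cur d).map pvClean := by
  intro d
  induction d with
  | nil => intro s row cur _; rfl
  | cons ch rest ih =>
    intro s row cur hd
    have h0 : cl[s]? = some ch := by
      have h1 : (cl.drop s)[0]? = some ch := by rw [hd]; rfl
      rw [List.getElem?_drop] at h1
      simpa using h1
    have hch : cl.getD s ' ' = ch := by
      simp [List.getD_eq_getElem?_getD, h0]
    have hdrop : cl.drop (s+1) = rest := by rw [← List.tail_drop, hd]; rfl
    rw [List.length_cons, List.range'_succ, List.foldl_cons]
    by_cases h : pvBrk cs s
    · have hstep : pvStepRow cs cl (row, cur) s = (row ++ [pvClean cur], []) := by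
        simp [pvStepRow, h]
      rw [hstep, ih (s+1) _ _ hdrop]
      simp [pvRowWords, h]
    · have hstep : pvStepRow cs cl (row, cur) s = (row, cur ++ [ch]) := by
        simp [pvStepRow, h, List.getD_eq_getElem?_getD, h0]
      rw [hstep, ih (s+1) _ _ hdrop]
      simp [pvRowWords, h]

-- per-row characterisation of B's slicing loop + final slice
theorem rowB (cs : List (List Char)) (cl : List Char) :
    ∀ (d : List Char) (s0 s : Nat) (cur : List Char) (ws0 : List String),
    cl.drop s0 = cur ++ d → s0 + cur.length = s → cl.drop s = d →
    pvFinB cl ((((List.range' s (cl.length - s)).filter (pvBrk cs)).map (fun (k : Nat) => (k:Int))).foldl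
        (pvStepB cl) ((s0:Int), ws0))
      = ws0 ++ (pvRowWords cs s cur d).map pvClean := by
  intro d
  induction d with
  | nil =>
    intro s0 s cur ws0 h0 hlen hs
    have hle : cl.length ≤ s := by
      have := List.drop_eq_nil_iff.mp hs
      omega
    have hz : cl.length - s = 0 := by omega
    rw [hz]
    simp only [List.range'_zero, List.filter_nil, List.map_nil, List.foldl_nil]
    unfold pvFinB
    rw [PySem.List.slice_from_natCast, h0]
    simp [pvRowWords]
  | cons ch rest ih =>
    intro s0 s cur ws0 h0 hlen hs
    have hslt : s < cl.length := by
      by_contra hge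
      rw [List.drop_eq_nil_iff.mpr (by omega)] at hs
      exact List.cons_ne_nil ch rest hs.symm
    have hdrop : cl.drop (s+1) = rest := by rw [← List.tail_drop, hs]; rfl
    have hn : cl.length - s = (cl.length - (s+1)) + 1 := by omega
    rw [hn, List.range'_succ, List.filter_cons]
    by_cases h : pvBrk cs s
    · rw [if_pos h]
      simp only [List.map_cons, List.foldl_cons]
      have hstep : pvStepB cl ((s0:Int), ws0) ((s:Nat):Int)
          = (((s+1 : Nat) : Int), ws0 ++ [pvClean cur]) := by
        unfold pvStepB
        rw [PySem.List.slice_natCast, h0]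
        have hsub : s - s0 = cur.length := by omega
        rw [hsub, List.take_left' rfl]
        simp only [Prod.mk.injEq]
        exact ⟨by push_cast; ring, trivial⟩
      rw [hstep, ih (s+1) (s+1) [] (ws0 ++ [pvClean cur]) (by simpa using hdrop) (by simp) hdrop]
      simp [pvRowWords, h]
    · rw [if_neg h]
      rw [ih s0 (s+1) (cur ++ [ch]) ws0 (by rw [h0]; simp) (by simp; omega) hdrop]
      simp [pvRowWords, h]

-- A's whole loop, stated on the map form the port produces
theorem foldA_map2 (cs : List (List Char)) (L : Nat) (F : List Char → List String)
    (G : List Char → List Char) :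
    (((List.range L).map (fun (k : Nat) => (k:Int))).foldl (pvStepA cs) (cs.map F, cs.map G))
      = (cs.map (fun cl => ((List.range L).foldl (pvStepRow cs cl) (F cl, G cl)).1),
         cs.map (fun cl => ((List.range L).foldl (pvStepRow cs cl) (F cl, G cl)).2)) := by
  rw [List.foldl_map]
  exact foldA_map cs (List.range L) F G

-- B's break-column list, with the Int casts pulled outside the filter
theorem breaks_cast (cs : List (List Char)) (L : Nat) :
    ((List.range L).map (fun (k : Nat) => (k:Int))).filter
        (fun i => cs.any (fun c => (PySem.List.pyGet? c i).getD ' ' == ' '))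
      = ((List.range L).filter (pvBrk cs)).map (fun (k : Nat) => (k:Int)) := by
  rw [List.filter_map]
  congr 1
  refine List.filter_congr (fun k _ => ?_)
  simp [Function.comp, pvBrk]

-- ===== VERDICT (by name: the statement is the Claim_ definition above) =====
theorem align_to_words_spec : Claim_equal_align_to_words := by
  intro texts _ hpre
  unfold Spec_align_to_words
  match texts with
  | [] => rfl
  | t0 :: ts =>
    simp only [Pre_align_to_words, List.all_eq_true, List.headD_cons, Bool.and_eq_true,
      beq_iff_eq] at hpre
    have hlen : ∀ t ∈ t0 :: ts, (pvContent t).toList.length = (pvContent t0).toList.length := by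
      intro t ht
      simpa using (hpre t ht).2
    have hguard : ((t0 :: ts).any fun t =>
        (pvContent t).toList.length != (pvContent t0).toList.length) = false := by
      rw [List.any_eq_false]
      intro t ht
      simp [hlen t ht]
    have hcs : ∀ cl ∈ (t0 :: ts).map (fun t => (pvContent t).toList),
        cl.length = (pvContent t0).toList.length := by
      intro cl hcl
      rcases List.mem_map.mp hcl with ⟨t, ht, rfl⟩
      exact hlen t ht
    have hA : align_to_words (t0 :: ts)
        = ((t0 :: ts).map (fun t => (pvContent t).toList)).map
            (fun cl => [] ++ (pvRowWords ((t0 :: ts).map (fun t => (pvContent t).toList)) 0 [] cl).map pvClean) := by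
      simp only [align_to_words, hguard, Bool.false_eq_true, if_false, pyRange_cast]
      rw [show ((t0 :: ts).map (fun _ => ([] : List String)))
            = ((t0 :: ts).map (fun t => (pvContent t).toList)).map (fun _ => ([] : List String)) by rw [List.map_map]; rfl,
        show ((t0 :: ts).map (fun _ => ([] : List Char)))
            = ((t0 :: ts).map (fun t => (pvContent t).toList)).map (fun _ => ([] : List Char)) by rw [List.map_map]; rfl,
        foldA_map2, pv_zipWith_map_same]
      refine List.map_congr_left (fun cl hcl => ?_)
      have hL : cl.length = (pvContent t0).toList.length := hcs cl hcl
      rw [← hL, List.range_eq_range']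
      exact rowA _ cl cl 0 [] [] (by simp)
    have hB : align_to_words_alt (t0 :: ts)
        = ((t0 :: ts).map (fun t => (pvContent t).toList)).map
            (fun cl => [] ++ (pvRowWords ((t0 :: ts).map (fun t => (pvContent t).toList)) 0 [] cl).map pvClean) := by
      simp only [align_to_words_alt, hguard, Bool.false_eq_true, if_false, pyRange_cast]
      rw [breaks_cast]
      refine List.map_congr_left (fun cl hcl => ?_)
      have hL : cl.length = (pvContent t0).toList.length := hcs cl hcl
      have h := rowB ((t0 :: ts).map (fun t => (pvContent t).toList)) cl cl 0 0 [] []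
        (by simp) (by simp) (by simp)
      rw [← hL, List.range_eq_range']
      simpa [pvFinB] using h
    rw [hA, hB]
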